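-- pv_equiv track=rewrite | github.com/JustinKuli/adventofcode | 2024-python/day07/main.py | possible2
-- ===== SOURCE A (Python) =====
-- def possible2(val, nums):
--     if len(nums) == 1:
--         return val == nums[0]
--
--     if nums[0] > val:
--         return False
--
--     # Try concatenation
--     if possible2(val, [int(str(nums[0]) + str(nums[1]))] + nums[2:]):
--         return True
--
--     # Try multiplication
--     if possible2(val, [nums[0]*nums[1]] + nums[2:]):
--         return True
--
--     return possible2(val, [nums[0]+nums[1]] + nums[2:])
-- ===== SOURCE B (Python) =====
-- def possible2(val, nums):
--     # Level-by-level reachable-value set instead of A's early-return DFS.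
--     reach = {nums[0]}
--     for b in nums[1:]:
--         nxt = set()
--         for a in reach:
--             if a <= val:
--                 nxt.add(int(str(a) + str(b)))
--                 nxt.add(a * b)
--                 nxt.add(a + b)
--         reach = nxt
--     return val in reach
-- ===== Notes on version B (the rewrite author's own statement) =====
-- stated objective: alternative
-- what changed: Replaces A's early-return DFS recursion (which rebuilds a list at every call) with an iterative level-by-level pass that maintains the set of reachable accumulated values, deduplicating equal intermediate results.
import Mathlib
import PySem

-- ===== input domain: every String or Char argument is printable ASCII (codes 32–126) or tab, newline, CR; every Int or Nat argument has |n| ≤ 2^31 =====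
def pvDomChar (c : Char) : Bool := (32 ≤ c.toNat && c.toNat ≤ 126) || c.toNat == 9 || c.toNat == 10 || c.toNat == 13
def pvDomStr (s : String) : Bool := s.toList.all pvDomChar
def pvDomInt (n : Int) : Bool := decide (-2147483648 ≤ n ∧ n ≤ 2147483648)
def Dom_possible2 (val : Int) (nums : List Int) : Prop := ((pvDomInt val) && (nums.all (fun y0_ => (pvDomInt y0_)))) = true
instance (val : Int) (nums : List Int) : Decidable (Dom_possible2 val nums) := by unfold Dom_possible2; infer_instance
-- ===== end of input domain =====

-- B replaces A's early-return DFS recursion with a level-by-level pass over the set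
-- of reachable accumulated values (alternative decomposition; duplicates merged).

-- ===== PORT A =====
-- int(str(a) + str(b)); Python raises ValueError when the string does not parse
-- (only possible when b < 0) — those inputs are outside Pre_, so .getD 0 never fires there.
def pyCat (a b : Int) : Int :=
  (PySem.Int.ofStr? (PySem.Int.toStr a ++ PySem.Int.toStr b)).getD 0

def possible2 (val : Int) (nums : List Int) : Bool :=
  match nums with
  | [] => false            -- Python raises IndexError here; [] is outside Pre_
  | [a] => val == a
  | a :: b :: rest =>
    if a > val then false
    else if possible2 val (pyCat a b :: rest) then true
    else if possible2 val ((a * b) :: rest) then true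
    else possible2 val ((a + b) :: rest)
termination_by nums.length
decreasing_by all_goals simp

-- ===== PORT B =====
def possible2_alt (val : Int) (nums : List Int) : Bool :=
  match nums with
  | [] => false            -- Python raises IndexError here; [] is outside Pre_
  | a :: rest =>
    let final := rest.foldl
      (fun reach b =>
        reach.foldl
          (fun nxt v =>
            if v ≤ val then PySem.Set.add (PySem.Set.add (PySem.Set.add nxt (pyCat v b)) (v * b)) (v + b)
            else nxt)
          PySem.Set.empty)
      (PySem.Set.ofList [a])
    PySem.Set.contains final val

-- ===== PRECONDITION & SPEC =====
-- A's search raises ValueError exactly when it expands a state whose next number is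
-- negative (int(str(a)+str(b)) with b < 0 never parses); since all three operations are
-- monotone in the accumulated value for a non-negative right operand, that happens exactly
-- when the GREEDY MINIMUM accumulated value stays ≤ val up to the first negative element
-- of the tail.  raiseA computes that single greedy-minimum pass (it is not either port's
-- exponential search).
def raiseA (val acc : Int) : List Int → Bool
  | [] => false
  | b :: rest =>
    if acc > val then false
    else if b < 0 then true
    else raiseA val (min (pyCat acc b) (min (acc * b) (acc + b))) rest

-- Pre_ excludes EXACTLY the inputs on which the Python A raises: the empty list
-- (IndexError) and the inputs satisfying the greedy-minimum condition above (ValueError);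
-- on every other input A returns, and B matches it there.
def Pre_possible2 (val : Int) (nums : List Int) : Prop :=
  nums ≠ [] ∧ raiseA val nums.headI nums.tail = false
instance (val : Int) (nums : List Int) : Decidable (Pre_possible2 val nums) := by
  unfold Pre_possible2; infer_instance

def pvWitness_possible2 : Int × List Int := (190, [19, 10, 5])

def Spec_possible2 (val : Int) (nums : List Int) (out : Bool) : Prop := out = possible2_alt val nums
instance (val : Int) (nums : List Int) (out : Bool) : Decidable (Spec_possible2 val nums out) := by unfold Spec_possible2; infer_instance

-- ===== CLAIM (what is proved, stated in full; the proofs are below) =====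
def Claim_equal_possible2 : Prop := ∀ (val : Int) (nums : List Int), Dom_possible2 val nums → Pre_possible2 val nums → Spec_possible2 val nums (possible2 val nums)

-- ===== LEMMAS AND PROOFS =====

-- A's two-or-more-element case as one boolean equation
theorem possible2_cons2 (val a b : Int) (rest : List Int) :
    possible2 val (a :: b :: rest) =
      (decide (a ≤ val) &&
        (possible2 val (pyCat a b :: rest) || possible2 val ((a * b) :: rest) ||
          possible2 val ((a + b) :: rest))) := by
  rw [possible2]
  by_cases h : a > val
  · have h' : ¬ a ≤ val := by omega
    simp [h, h']
  · have h' : a ≤ val := by omega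
    rw [if_neg h]
    simp only [h', decide_true, Bool.true_and]
    cases possible2 val (pyCat a b :: rest) <;>
      cases possible2 val ((a * b) :: rest) <;> simp

-- membership in one level-step of B's inner fold (generic in the three combiners)
theorem mem_step (val : Int) (f1 f2 f3 : Int → Int) (S : List Int) : ∀ (acc : List Int) (x : Int),
    x ∈ S.foldl
        (fun nxt v =>
          if v ≤ val then PySem.Set.add (PySem.Set.add (PySem.Set.add nxt (f1 v)) (f2 v)) (f3 v)
          else nxt) acc
      ↔ x ∈ acc ∨ ∃ v ∈ S, v ≤ val ∧ (x = f1 v ∨ x = f2 v ∨ x = f3 v) := by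
  induction S with
  | nil => intro acc x; simp
  | cons u S ih =>
    intro acc x
    simp only [List.foldl_cons]
    rw [ih]
    by_cases h : u ≤ val
    · rw [if_pos h]
      simp only [PySem.Set.mem_add, List.mem_cons, exists_eq_or_imp, h, true_and, or_assoc]
    · rw [if_neg h]
      simp only [List.mem_cons, exists_eq_or_imp, h, false_and, false_or]

-- B's whole fold computes exactly "some start value in the current set leads A to True"
theorem foldl_levels (val : Int) (rest : List Int) :
    ∀ S : List Int,
      (val ∈ rest.foldl
        (fun reach b =>
          reach.foldl
            (fun nxt v =>
              if v ≤ val then PySem.Set.add (PySem.Set.add (PySem.Set.add nxt (pyCat v b)) (v * b)) (v + b)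
              else nxt)
            PySem.Set.empty) S)
      ↔ ∃ v ∈ S, possible2 val (v :: rest) = true := by
  induction rest with
  | nil =>
    intro S
    simp only [List.foldl_nil]
    constructor
    · intro h; exact ⟨val, h, by simp [possible2]⟩
    · rintro ⟨v, hv, h⟩
      simp only [possible2] at h
      have : val = v := by simpa using h
      simpa [this] using hv
  | cons b rs ih =>
    intro S
    simp only [List.foldl_cons]
    rw [ih]
    constructor
    · rintro ⟨v, hv, h⟩
      rw [mem_step val (fun v => pyCat v b) (fun v => v * b) (fun v => v + b) S PySem.Set.empty v] at hv
      rcases hv with h0 | ⟨u, hu, hle, hv⟩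
      · simp [PySem.Set.empty] at h0
      · refine ⟨u, hu, ?_⟩
        rw [possible2_cons2]
        simp only [Bool.and_eq_true, Bool.or_eq_true, decide_eq_true_eq]
        refine ⟨hle, ?_⟩
        rcases hv with h2 | h2 | h2 <;> rw [h2] at h
        exacts [Or.inl (Or.inl h), Or.inl (Or.inr h), Or.inr h]
    · rintro ⟨u, hu, h⟩
      rw [possible2_cons2] at h
      simp only [Bool.and_eq_true, Bool.or_eq_true, decide_eq_true_eq] at h
      obtain ⟨hle, h3⟩ := h
      rcases h3 with (h' | h') | h'
      · exact ⟨pyCat u b,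
          (mem_step val (fun v => pyCat v b) (fun v => v * b) (fun v => v + b) S PySem.Set.empty _).2
            (Or.inr ⟨u, hu, hle, Or.inl rfl⟩), h'⟩
      · exact ⟨u * b,
          (mem_step val (fun v => pyCat v b) (fun v => v * b) (fun v => v + b) S PySem.Set.empty _).2
            (Or.inr ⟨u, hu, hle, Or.inr (Or.inl rfl)⟩), h'⟩
      · exact ⟨u + b,
          (mem_step val (fun v => pyCat v b) (fun v => v * b) (fun v => v + b) S PySem.Set.empty _).2
            (Or.inr ⟨u, hu, hle, Or.inr (Or.inr rfl)⟩), h'⟩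

theorem alt_eq (val a : Int) (rest : List Int) :
    possible2_alt val (a :: rest) = possible2 val (a :: rest) := by
  rw [Bool.eq_iff_iff]
  simp only [possible2_alt]
  rw [PySem.Set.contains_iff, foldl_levels]
  constructor
  · rintro ⟨v, hv, h⟩
    have : v = a := by simpa [PySem.Set.ofList, PySem.Set.add, PySem.Set.empty] using hv
    subst this; exact h
  · intro h
    exact ⟨a, by simp [PySem.Set.ofList, PySem.Set.add, PySem.Set.empty], h⟩

-- ===== VERDICT (by name: the statement is the Claim_ definition above) =====
theorem possible2_spec : Claim_equal_possible2 := by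
  intro val nums _ hpre
  unfold Spec_possible2
  match nums with
  | [] => exact absurd rfl hpre.1
  | a :: rest => exact (alt_eq val a rest).symm
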